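-- pv_equiv track=rewrite | github.com/sai-lalith/CSD311-Assignments | asg2/sample_utils.py | get_zone_elements
-- ===== SOURCE A (Python) =====
-- def get_zone_elements(zone_type, coord1, coord2, board):
--   """Get all non-zero elements from a col, row or square
--   zone_type (str): col / row / square
--   coord1, coord2 (int): coordinates of the element we're at
--   coord1 = row
--   coord2 = col"""
--   elements = []
--   if zone_type == "col":
--     for row in range(0, 9):
--       if board[row][coord2] != 0:
--         elements.append(board[row][coord2])
--   elif zone_type == "row":
--     for col in range(0, 9):
--       if board[coord1][col] != 0:
--         elements.append(board[coord1][col])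
--   else:
--     square_coords = generate_square_coords()
--     for square in square_coords:
--       if (square["row_begin"] <= coord1 <= square["row_end"]) and (square["col_begin"] <= coord2 <= square["col_end"]):
--         for row in range(square["row_begin"], square["row_end"]+1):
--           for col in range(square["col_begin"], square["col_end"]+1):
--             if board[row][col] != 0:
--               elements.append(board[row][col])
--         break
--
--   return elements
--
-- def generate_square_coords():
--   """Build a tuple of disctionaries with square coords"""
--   square_coordinates = []
--   row_begin = 0
--   row_end = 2
--   col_begin = 0
--   col_end = 2
--
--   while len(square_coordinates) < 9:
--     square_coordinates.append({
--       "row_begin" : row_begin,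
--       "row_end" : row_end,
--       "col_begin": col_begin,
--       "col_end" : col_end
--     })
--     if col_begin < 6 and col_end < 8:
--       col_begin += 3
--       col_end += 3
--     else:
--       col_begin = 0
--       col_end = 2
--       row_begin += 3
--       row_end += 3
--
--   return tuple(square_coordinates)
-- ===== SOURCE B (Python) =====
-- def get_zone_elements(zone_type, coord1, coord2, board):
--   """Get all non-zero elements from a col, row or square (block computed arithmetically)."""
--   if zone_type == "col":
--     cells = [board[r][coord2] for r in range(9)]
--   elif zone_type == "row":
--     cells = [board[coord1][c] for c in range(9)]
--   elif 0 <= coord1 <= 8 and 0 <= coord2 <= 8: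
--     r0 = coord1 // 3 * 3
--     c0 = coord2 // 3 * 3
--     cells = [board[r][c] for r in range(r0, r0 + 3) for c in range(c0, c0 + 3)]
--   else:
--     cells = []
--   return [v for v in cells if v != 0]
-- ===== Notes on version B (the rewrite author's own statement) =====
-- stated objective: simpler
-- what changed: Replaces the build-a-table-of-9-square-dicts-and-scan-for-a-match square branch by direct block-origin arithmetic (r0 = coord1 // 3 * 3, c0 = coord2 // 3 * 3) over a range guard, and expresses all three zones as a comprehension followed by one non-zero filter instead of append-inside-loop.
import Mathlib
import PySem

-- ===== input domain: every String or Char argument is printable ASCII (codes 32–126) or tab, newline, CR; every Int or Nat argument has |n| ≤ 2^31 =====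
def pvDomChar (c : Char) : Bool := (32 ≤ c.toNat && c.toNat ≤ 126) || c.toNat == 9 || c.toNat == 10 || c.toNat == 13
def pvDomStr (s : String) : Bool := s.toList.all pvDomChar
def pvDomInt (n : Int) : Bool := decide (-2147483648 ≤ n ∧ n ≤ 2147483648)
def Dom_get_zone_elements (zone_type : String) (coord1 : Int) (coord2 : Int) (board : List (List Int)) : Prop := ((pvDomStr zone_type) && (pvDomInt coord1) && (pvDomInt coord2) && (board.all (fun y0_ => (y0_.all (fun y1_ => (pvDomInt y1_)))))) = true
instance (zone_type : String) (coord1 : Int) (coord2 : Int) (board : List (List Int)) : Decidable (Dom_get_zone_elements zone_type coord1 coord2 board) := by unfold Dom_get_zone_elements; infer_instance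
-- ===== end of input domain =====

-- B replaces A's square-coordinate table build + linear scan by direct block-origin
-- arithmetic and writes each zone as a comprehension followed by one non-zero filter (simpler).


-- ===== PORT A =====
-- while loop of generate_square_coords: runs until 9 squares are built; the fuel is
-- exactly 9 - len(square_coordinates), which drops by one each of the 9 iterations.
def pvSquaresLoop : Nat → Int → Int → Int → Int → List (PySem.Dict String Int) → List (PySem.Dict String Int)
  | 0, _, _, _, _, acc => acc
  | n + 1, row_begin, row_end, col_begin, col_end, acc =>
    let d := ((((PySem.Dict.empty).insert "row_begin" row_begin).insert "row_end" row_end).insert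
                "col_begin" col_begin).insert "col_end" col_end
    if col_begin < 6 ∧ col_end < 8 then
      pvSquaresLoop n row_begin row_end (col_begin + 3) (col_end + 3) (acc ++ [d])
    else
      pvSquaresLoop n (row_begin + 3) (row_end + 3) 0 2 (acc ++ [d])

def generate_square_coords : List (PySem.Dict String Int) :=
  pvSquaresLoop 9 0 2 0 2 []

-- the 'for square in square_coords: if …: …; break' loop
def pvScanSquares (coord1 coord2 : Int) (board : List (List Int)) :
    List (PySem.Dict String Int) → List Int → List Int
  | [], elements => elements
  | square :: rest, elements =>
    let rb := square.getD "row_begin" 0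
    let re := square.getD "row_end" 0
    let cb := square.getD "col_begin" 0
    let ce := square.getD "col_end" 0
    if rb ≤ coord1 ∧ coord1 ≤ re ∧ cb ≤ coord2 ∧ coord2 ≤ ce then
      (PySem.List.pyRange rb (re + 1) 1).foldl (fun acc row =>
        (PySem.List.pyRange cb (ce + 1) 1).foldl (fun acc2 col =>
          if PySem.List.pyGetD (PySem.List.pyGetD board row []) col 0 != 0 then
            acc2 ++ [PySem.List.pyGetD (PySem.List.pyGetD board row []) col 0]
          else acc2) acc) elements
    else pvScanSquares coord1 coord2 board rest elements

def get_zone_elements (zone_type : String) (coord1 : Int) (coord2 : Int) (board : List (List Int)) : List Int :=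
  let elements : List Int := []
  if zone_type == "col" then
    (PySem.List.pyRange 0 9 1).foldl (fun acc row =>
      if PySem.List.pyGetD (PySem.List.pyGetD board row []) coord2 0 != 0 then
        acc ++ [PySem.List.pyGetD (PySem.List.pyGetD board row []) coord2 0]
      else acc) elements
  else if zone_type == "row" then
    (PySem.List.pyRange 0 9 1).foldl (fun acc col =>
      if PySem.List.pyGetD (PySem.List.pyGetD board coord1 []) col 0 != 0 then
        acc ++ [PySem.List.pyGetD (PySem.List.pyGetD board coord1 []) col 0]
      else acc) elements
  else
    pvScanSquares coord1 coord2 board generate_square_coords elements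

-- ===== PORT B =====
def get_zone_elements_alt (zone_type : String) (coord1 : Int) (coord2 : Int) (board : List (List Int)) : List Int :=
  let cells : List Int :=
    if zone_type == "col" then
      (PySem.List.pyRange 0 9 1).map (fun r => PySem.List.pyGetD (PySem.List.pyGetD board r []) coord2 0)
    else if zone_type == "row" then
      (PySem.List.pyRange 0 9 1).map (fun c => PySem.List.pyGetD (PySem.List.pyGetD board coord1 []) c 0)
    else if 0 ≤ coord1 ∧ coord1 ≤ 8 ∧ 0 ≤ coord2 ∧ coord2 ≤ 8 then
      let r0 := PySem.Int.floordiv coord1 3 * 3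
      let c0 := PySem.Int.floordiv coord2 3 * 3
      (PySem.List.pyRange r0 (r0 + 3) 1).flatMap (fun r =>
        (PySem.List.pyRange c0 (c0 + 3) 1).map (fun c =>
          PySem.List.pyGetD (PySem.List.pyGetD board r []) c 0))
    else []
  cells.filter (fun v => v != 0)

-- ===== PRECONDITION & SPEC =====
-- Pre_ excludes exactly the inputs on which Python A raises an IndexError:
-- in the col branch board must have 9 rows each admitting index coord2 (negative wrap allowed),
-- in the row branch coord1 must index board and its row must have 9 cells, and in the square
-- branch (only when 0..8 coordinates select a block) the block's 3 rows must exist and be long enough.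
def Pre_get_zone_elements (zone_type : String) (coord1 : Int) (coord2 : Int) (board : List (List Int)) : Prop :=
  if zone_type = "col" then
    9 ≤ board.length ∧ ∀ row ∈ board.take 9, PySem.Raise.InRange row.length coord2
  else if zone_type = "row" then
    PySem.Raise.InRange board.length coord1 ∧ 9 ≤ (PySem.List.pyGetD board coord1 []).length
  else
    (0 ≤ coord1 ∧ coord1 ≤ 8 ∧ 0 ≤ coord2 ∧ coord2 ≤ 8) →
      (PySem.Int.floordiv coord1 3 * 3 + 3 ≤ (board.length : Int) ∧
       ∀ row ∈ (board.drop (PySem.Int.floordiv coord1 3 * 3).toNat).take 3,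
         PySem.Int.floordiv coord2 3 * 3 + 3 ≤ (row.length : Int))
instance (zone_type : String) (coord1 : Int) (coord2 : Int) (board : List (List Int)) : Decidable (Pre_get_zone_elements zone_type coord1 coord2 board) := by unfold Pre_get_zone_elements; infer_instance

def pvWitness_get_zone_elements : String × Int × Int × List (List Int) :=
  ("row", 0, 0, [[1, 2, 3, 4, 5, 6, 7, 8, 9]])

def Spec_get_zone_elements (zone_type : String) (coord1 : Int) (coord2 : Int) (board : List (List Int)) (out : List Int) : Prop := out = get_zone_elements_alt zone_type coord1 coord2 board
instance (zone_type : String) (coord1 : Int) (coord2 : Int) (board : List (List Int)) (out : List Int) : Decidable (Spec_get_zone_elements zone_type coord1 coord2 board out) := by unfold Spec_get_zone_elements; infer_instance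

-- ===== CLAIM (what is proved, stated in full; the proofs are below) =====
def Claim_equal_get_zone_elements : Prop := ∀ (zone_type : String) (coord1 : Int) (coord2 : Int) (board : List (List Int)), Dom_get_zone_elements zone_type coord1 coord2 board → Pre_get_zone_elements zone_type coord1 coord2 board → Spec_get_zone_elements zone_type coord1 coord2 board (get_zone_elements zone_type coord1 coord2 board)

-- ===== LEMMAS AND PROOFS =====

-- the nine square dicts, as a literal
theorem squares_eq : generate_square_coords =
    [PySem.Dict.mk [("row_begin", 0), ("row_end", 2), ("col_begin", 0), ("col_end", 2)],
     PySem.Dict.mk [("row_begin", 0), ("row_end", 2), ("col_begin", 3), ("col_end", 5)],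
     PySem.Dict.mk [("row_begin", 0), ("row_end", 2), ("col_begin", 6), ("col_end", 8)],
     PySem.Dict.mk [("row_begin", 3), ("row_end", 5), ("col_begin", 0), ("col_end", 2)],
     PySem.Dict.mk [("row_begin", 3), ("row_end", 5), ("col_begin", 3), ("col_end", 5)],
     PySem.Dict.mk [("row_begin", 3), ("row_end", 5), ("col_begin", 6), ("col_end", 8)],
     PySem.Dict.mk [("row_begin", 6), ("row_end", 8), ("col_begin", 0), ("col_end", 2)],
     PySem.Dict.mk [("row_begin", 6), ("row_end", 8), ("col_begin", 3), ("col_end", 5)],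
     PySem.Dict.mk [("row_begin", 6), ("row_end", 8), ("col_begin", 6), ("col_end", 8)]] := by
  decide

-- appending non-zero cells in a double loop = flat comprehension then one filter
theorem inner_eq (cell : Int → Int → Int) (R C : List Int) :
    R.foldl (fun acc r => C.foldl (fun acc2 c =>
        if cell r c != 0 then acc2 ++ [cell r c] else acc2) acc) ([] : List Int)
    = (R.flatMap (fun r => C.map (cell r))).filter (fun v => v != 0) := by
  simp only [PySem.List.foldl_append_if, PySem.List.foldl_append_eq_flatMap, List.nil_append,
    List.filter_flatMap]
  congr 1; funext r
  rw [List.filter_map]; rfl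


-- getD on the square dicts the table builds (literal keys, symbolic values)
theorem gRB (a b c d : Int) : (PySem.Dict.mk [("row_begin", a), ("row_end", b), ("col_begin", c), ("col_end", d)]).getD "row_begin" 0 = a := by
  simp [PySem.Dict.getD, PySem.Dict.get?]
theorem gRE (a b c d : Int) : (PySem.Dict.mk [("row_begin", a), ("row_end", b), ("col_begin", c), ("col_end", d)]).getD "row_end" 0 = b := by
  simp [PySem.Dict.getD, PySem.Dict.get?]
theorem gCB (a b c d : Int) : (PySem.Dict.mk [("row_begin", a), ("row_end", b), ("col_begin", c), ("col_end", d)]).getD "col_begin" 0 = c := by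
  simp [PySem.Dict.getD, PySem.Dict.get?]
theorem gCE (a b c d : Int) : (PySem.Dict.mk [("row_begin", a), ("row_end", b), ("col_begin", c), ("col_end", d)]).getD "col_end" 0 = d := by
  simp [PySem.Dict.getD, PySem.Dict.get?]

-- appending non-zero cells in a single loop = map then one filter
theorem single_eq (f : Int → Int) (R : List Int) :
    R.foldl (fun acc r => if f r != 0 then acc ++ [f r] else acc) ([] : List Int)
    = (R.map f).filter (fun v => v != 0) := by
  rw [PySem.List.foldl_append_if, List.filter_map, List.nil_append]; rfl

-- the square scan, evaluated: for in-range coordinates it lands in the block at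
-- (coord1 // 3 * 3, coord2 // 3 * 3)
theorem scan_eval (c1 c2 : Int) (board : List (List Int))
    (h1 : 0 ≤ c1) (h2 : c1 ≤ 8) (h3 : 0 ≤ c2) (h4 : c2 ≤ 8) :
    pvScanSquares c1 c2 board generate_square_coords []
    = ((PySem.List.pyRange (PySem.Int.floordiv c1 3 * 3) (PySem.Int.floordiv c1 3 * 3 + 3) 1).flatMap (fun r =>
        (PySem.List.pyRange (PySem.Int.floordiv c2 3 * 3) (PySem.Int.floordiv c2 3 * 3 + 3) 1).map (fun c =>
          PySem.List.pyGetD (PySem.List.pyGetD board r []) c 0))).filter (fun v => v != 0) := by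
  rw [squares_eq]
  simp only [pvScanSquares, gRB, gRE, gCB, gCE]
  have hr : (0 ≤ c1 ∧ c1 ≤ 2) ∨ (3 ≤ c1 ∧ c1 ≤ 5) ∨ (6 ≤ c1 ∧ c1 ≤ 8) := by omega
  have hc : (0 ≤ c2 ∧ c2 ≤ 2) ∨ (3 ≤ c2 ∧ c2 ≤ 5) ∨ (6 ≤ c2 ∧ c2 ≤ 8) := by omega
  have d1 := PySem.Int.floordiv_mul_add_mod c1 3
  have d2 : 0 ≤ PySem.Int.mod c1 3 := PySem.Int.mod_nonneg c1 (by norm_num)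
  have d3 : PySem.Int.mod c1 3 < 3 := PySem.Int.mod_lt c1 (by norm_num)
  have d4 := PySem.Int.floordiv_mul_add_mod c2 3
  have d5 : 0 ≤ PySem.Int.mod c2 3 := PySem.Int.mod_nonneg c2 (by norm_num)
  have d6 : PySem.Int.mod c2 3 < 3 := PySem.Int.mod_lt c2 (by norm_num)
  rcases hr with hr | hr | hr <;> rcases hc with hc | hc | hc <;>
    · repeat rw [if_neg (by omega)]
      rw [if_pos (by omega),
        inner_eq (fun r c => PySem.List.pyGetD (PySem.List.pyGetD board r []) c 0)]
      congr 1
      congr 1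
      · funext r
        congr 1
        congr 1 <;> omega
      · congr 1 <;> omega

theorem get_zone_elements_spec : Claim_equal_get_zone_elements := by
  intro zt c1 c2 board _ hpre
  unfold Spec_get_zone_elements get_zone_elements get_zone_elements_alt
  by_cases hcol : zt = "col"
  · simp only [hcol, beq_self_eq_true, if_true]
    exact single_eq (fun row => PySem.List.pyGetD (PySem.List.pyGetD board row []) c2 0) _
  · have hc' : (zt == "col") = false := beq_eq_false_iff_ne.mpr hcol
    simp only [hc', Bool.false_eq_true, if_false]
    by_cases hrow : zt = "row"
    · simp only [hrow, beq_self_eq_true, if_true]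
      exact single_eq (fun col => PySem.List.pyGetD (PySem.List.pyGetD board c1 []) col 0) _
    · have hr' : (zt == "row") = false := beq_eq_false_iff_ne.mpr hrow
      simp only [hr', Bool.false_eq_true, if_false]
      by_cases hin : 0 ≤ c1 ∧ c1 ≤ 8 ∧ 0 ≤ c2 ∧ c2 ≤ 8
      · rw [if_pos hin]
        obtain ⟨h1, h2, h3, h4⟩ := hin
        exact scan_eval c1 c2 board h1 h2 h3 h4
      · rw [if_neg hin, squares_eq]
        simp only [pvScanSquares, gRB, gRE, gCB, gCE]
        repeat rw [if_neg (by omega)]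
        simp
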